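-- pv_equiv track=rewrite | github.com/nitingopi/leetcode | max_cost.py | find_max_cost
-- ===== SOURCE A (Python) =====
-- def find_max_cost(arr):
--     """
--     Finds the maximum possible cost by calculating the max of the squares
--     of the maximum and minimum subarray sums.
--     """
--     if not arr:
--         return 0
--
--     # Initialize variables for finding max and min subarray sums
--     max_so_far = arr[0]
--     min_so_far = arr[0]
--
--     current_max = arr[0]
--     current_min = arr[0]
--
--     for i in range(1, len(arr)):
--         num = arr[i]
--
--         # Calculate max subarray sum ending at current position
--         # A new subarray can start at 'num' or extend the previous max subarray
--         current_max = max(num, current_max + num)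
--         max_so_far = max(max_so_far, current_max)
--
--         # Calculate min subarray sum ending at current position
--         # A new subarray can start at 'num' or extend the previous min subarray
--         current_min = min(num, current_min + num)
--         min_so_far = min(min_so_far, current_min)
--
--     # The max_cost is the square of the maximum absolute sum
--     # which is the max of the squares of the max and min sums
--     return max(max_so_far**2, min_so_far**2)
-- ===== SOURCE B (Python) =====
-- def find_max_cost(arr):
--     # prefix-sum decomposition: track min/max prefix sums instead of Kadane's running subarray
--     if not arr:
--         return 0
--     s = 0
--     min_pref = 0
--     max_pref = 0
--     max_sum = arr[0]
--     min_sum = arr[0]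
--     for x in arr:
--         s += x
--         max_sum = max(max_sum, s - min_pref)
--         min_sum = min(min_sum, s - max_pref)
--         min_pref = min(min_pref, s)
--         max_pref = max(max_pref, s)
--     return max(max_sum**2, min_sum**2)
-- ===== Notes on version B (the rewrite author's own statement) =====
-- stated objective: alternative
-- what changed: Replaces the dual Kadane recurrences (running max/min subarray sums ending at i) with a single prefix-sum pass that tracks the minimum and maximum prefix sums seen so far.
import Mathlib
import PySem

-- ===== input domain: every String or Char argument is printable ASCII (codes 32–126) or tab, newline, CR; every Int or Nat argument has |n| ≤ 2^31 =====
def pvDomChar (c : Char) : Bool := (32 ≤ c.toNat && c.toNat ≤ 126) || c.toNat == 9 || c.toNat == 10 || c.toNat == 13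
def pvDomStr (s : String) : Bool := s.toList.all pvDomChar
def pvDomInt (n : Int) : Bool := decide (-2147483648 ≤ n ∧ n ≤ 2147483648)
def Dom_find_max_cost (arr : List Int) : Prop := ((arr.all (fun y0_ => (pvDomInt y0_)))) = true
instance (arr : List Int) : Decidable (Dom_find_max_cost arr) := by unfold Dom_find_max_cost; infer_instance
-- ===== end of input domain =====

-- B computes the same value via prefix sums (min/max prefix seen so far) instead of Kadane's recurrences; same O(n) cost.

-- ===== PORT A =====
-- Kadane step: state (max_so_far, min_so_far, current_max, current_min)
def stepA (st : Int × Int × Int × Int) (num : Int) : Int × Int × Int × Int :=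
  let (ms, mn, cm, cn) := st
  let cm' := max num (cm + num)
  let ms' := max ms cm'
  let cn' := min num (cn + num)
  let mn' := min mn cn'
  (ms', mn', cm', cn')

def find_max_cost (arr : List Int) : Int :=
  match arr with
  | [] => 0
  | a :: rest =>
    let st := rest.foldl stepA (a, a, a, a)
    max (st.1 ^ 2) (st.2.1 ^ 2)

-- ===== PORT B =====
-- prefix-sum step: state (s, min_pref, max_pref, max_sum, min_sum)
def stepB (st : Int × Int × Int × Int × Int) (x : Int) : Int × Int × Int × Int × Int :=
  let (s, minp, maxp, M, m) := st
  let s' := s + x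
  let M' := max M (s' - minp)
  let m' := min m (s' - maxp)
  (s', min minp s', max maxp s', M', m')

def find_max_cost_alt (arr : List Int) : Int :=
  match arr with
  | [] => 0
  | a :: _ =>
    let st := arr.foldl stepB (0, 0, 0, a, a)
    max (st.2.2.2.1 ^ 2) (st.2.2.2.2 ^ 2)

-- ===== PRECONDITION & SPEC =====
def Spec_find_max_cost (arr : List Int) (out : Int) : Prop := out = find_max_cost_alt arr
instance (arr : List Int) (out : Int) : Decidable (Spec_find_max_cost arr out) := by unfold Spec_find_max_cost; infer_instance

-- ===== CLAIM (what is proved, stated in full; the proofs are below) =====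
def Claim_equal_find_max_cost : Prop := ∀ (arr : List Int), Dom_find_max_cost arr → Spec_find_max_cost arr (find_max_cost arr)

-- ===== LEMMAS AND PROOFS =====

-- Invariant linking the two fold states: if A's state after a prefix is (ms, mn, cm, cn)
-- and the prefix sums to s, then B's state is (s, s - max cm 0, s - min cn 0, ms, mn).
theorem fold_inv (rest : List Int) :
    ∀ (s ms mn cm cn : Int),
      rest.foldl stepB (s, s - max cm 0, s - min cn 0, ms, mn) =
        (let st := rest.foldl stepA (ms, mn, cm, cn)
         (s + rest.sum, (s + rest.sum) - max st.2.2.1 0, (s + rest.sum) - min st.2.2.2 0,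
          st.1, st.2.1)) := by
  induction rest with
  | nil => intro s ms mn cm cn; simp
  | cons x t ih =>
    intro s ms mn cm cn
    have hB : stepB (s, s - max cm 0, s - min cn 0, ms, mn) x =
        (s + x, (s + x) - max (max x (cm + x)) 0, (s + x) - min (min x (cn + x)) 0,
         max ms (max x (cm + x)), min mn (min x (cn + x))) := by
      simp [stepB]
      refine ⟨by omega, by omega, by omega, by omega⟩
    have hA : stepA (ms, mn, cm, cn) x =
        (max ms (max x (cm + x)), min mn (min x (cn + x)), max x (cm + x), min x (cn + x)) := by
      simp [stepA]
    simp only [List.foldl_cons, hB, hA, ih, List.sum_cons]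
    have : s + x + t.sum = s + (x + t.sum) := by ring
    rw [this]

theorem find_max_cost_eq (arr : List Int) : find_max_cost arr = find_max_cost_alt arr := by
  cases arr with
  | nil => rfl
  | cons a rest =>
    simp only [find_max_cost, find_max_cost_alt, List.foldl_cons]
    have hB : stepB (0, 0, 0, a, a) a = (a, a - max a 0, a - min a 0, a, a) := by
      simp [stepB]; omega
    rw [hB, fold_inv rest a a a a a]

-- ===== VERDICT (by name: the statement is the Claim_ definition above) =====
theorem find_max_cost_spec : Claim_equal_find_max_cost := by
  intro arr _
  unfold Spec_find_max_cost
  exact find_max_cost_eq arr
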